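-- pv_equiv track=rewrite | github.com/compbiogroup/Approximation-Algorithms-for-Sorting-by-k-Cuts-on-Signed-Permutations | CG.py | renumber_canonical_configuration
-- ===== SOURCE A (Python) =====
-- def renumber_canonical_configuration(configuration) :
--     index = []
--     for cycle in configuration :
--         for el in cycle :
--             index.append(abs(el))
--
--     index.sort()
--     old_to_new = {}
--     for i in range(len(index)) :
--         old_to_new[index[i]] = i+1
--
--     new = []
--     for cycle in configuration :
--         ncycle = []
--         for el in cycle :
--             if el < 0 :
--                 ncycle.append(-old_to_new[-el])
--             else :
--                 ncycle.append(old_to_new[el])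
--         new.append(ncycle)
--     return new, index
-- ===== SOURCE B (Python) =====
-- def renumber_canonical_configuration(configuration):
--     # Rank of each element computed by binary search on the sorted multiset of
--     # absolute values (bisect_right), instead of building an old->new dict.
--     index = sorted(abs(el) for cycle in configuration for el in cycle)
--
--     def rank(v):
--         # bisect_right(index, v): number of entries <= v
--         lo, hi = 0, len(index)
--         while lo < hi:
--             mid = (lo + hi) // 2
--             if v < index[mid]:
--                 hi = mid
--             else:
--                 lo = mid + 1
--         return lo
--
--     new = []
--     for cycle in configuration:
--         ncycle = []
--         for el in cycle:
--             r = rank(abs(el))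
--             ncycle.append(-r if el < 0 else r)
--         new.append(ncycle)
--     return new, index
-- ===== Notes on version B (the rewrite author's own statement) =====
-- stated objective: alternative
-- what changed: Drops A's dict-building pass entirely: each element's canonical rank is computed directly by binary search (bisect_right) on the sorted absolute values, the count of entries <= |el| equalling A's last-wins dict value.
import Mathlib
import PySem

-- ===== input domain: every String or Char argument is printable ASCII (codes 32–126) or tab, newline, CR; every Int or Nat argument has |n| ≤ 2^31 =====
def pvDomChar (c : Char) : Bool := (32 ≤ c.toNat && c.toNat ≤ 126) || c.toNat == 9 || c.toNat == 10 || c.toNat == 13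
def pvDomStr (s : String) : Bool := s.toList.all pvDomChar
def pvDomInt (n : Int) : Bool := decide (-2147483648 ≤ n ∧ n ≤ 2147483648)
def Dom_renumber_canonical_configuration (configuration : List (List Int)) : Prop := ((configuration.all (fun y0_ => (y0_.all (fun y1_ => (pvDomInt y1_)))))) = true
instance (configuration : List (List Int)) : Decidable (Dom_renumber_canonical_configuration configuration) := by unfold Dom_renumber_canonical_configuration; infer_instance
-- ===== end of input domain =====

-- B replaces A's old->new dict (built in a full extra pass) by a direct binary search
-- (bisect_right) on the sorted absolute values; same return value (alternative, no speed claim).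

-- ===== PORT A =====
-- 'for i in range(len(index)): old_to_new[index[i]] = i+1' — the loop walks the list
-- with its running index i, inserting index[i] -> i+1.
def pvBuildMap : List Int → Int → PySem.Dict Int Int → PySem.Dict Int Int
  | [], _, d => d
  | x :: xs, i, d => pvBuildMap xs (i + 1) (d.insert x (i + 1))

def renumber_canonical_configuration (configuration : List (List Int)) : List (List Int) × List Int :=
  let index0 := configuration.foldl (fun acc cycle => cycle.foldl (fun acc el => acc ++ [|el|]) acc) []
  let index := PySem.List.sorted index0 (fun x => x)
  let old_to_new := pvBuildMap index 0 PySem.Dict.empty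
  -- old_to_new[el] / old_to_new[-el]: the key is always present (it is |el|, which was
  -- appended to index), so Python's KeyError never fires; getD _ 0 is exact here.
  let new := configuration.foldl (fun new cycle =>
    new ++ [cycle.foldl (fun nc el =>
      if el < 0 then nc ++ [-(old_to_new.getD (-el) 0)] else nc ++ [old_to_new.getD el 0]) []]) []
  (new, index)

-- ===== PORT B =====
-- Source B's hand-written rank(v) is CPython's bisect_right loop verbatim
-- (lo/hi, mid = (lo+hi)//2, 'if v < index[mid]'); PySem.List.bisectRight is that exact loop.
def renumber_canonical_configuration_alt (configuration : List (List Int)) : List (List Int) × List Int :=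
  let index := PySem.List.sorted (configuration.flatMap (fun cycle => cycle.map (fun el => |el|))) (fun x => x)
  let new := configuration.map (fun cycle => cycle.map (fun el =>
    let r : Int := (PySem.List.bisectRight index |el| : Nat)
    if el < 0 then -r else r))
  (new, index)

-- ===== PRECONDITION & SPEC =====
def Spec_renumber_canonical_configuration (configuration : List (List Int)) (out : List (List Int) × List Int) : Prop := out = renumber_canonical_configuration_alt configuration
instance (configuration : List (List Int)) (out : List (List Int) × List Int) : Decidable (Spec_renumber_canonical_configuration configuration out) := by unfold Spec_renumber_canonical_configuration; infer_instance

-- ===== CLAIM (what is proved, stated in full; the proofs are below) =====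
def Claim_equal_renumber_canonical_configuration : Prop := ∀ (configuration : List (List Int)), Dom_renumber_canonical_configuration configuration → Spec_renumber_canonical_configuration configuration (renumber_canonical_configuration configuration)

-- ===== LEMMAS AND PROOFS =====

-- Keys not in l are untouched by the building loop.
theorem pvBuildMap_getD_not_mem (l : List Int) (i : Int) (d : PySem.Dict Int Int) (v : Int)
    (hv : v ∉ l) : (pvBuildMap l i d).getD v 0 = d.getD v 0 := by
  induction l generalizing i d with
  | nil => rfl
  | cons x xs ih =>
      simp only [pvBuildMap]
      rw [ih _ _ (fun h => hv (List.mem_cons_of_mem _ h))]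
      rw [PySem.Dict.getD_insert]
      simp only [List.mem_cons, not_or] at hv
      simp [hv.1]

-- Last-wins dict value of a member v of a sorted list = number of entries ≤ v (+ offset).
theorem pvBuildMap_getD_mem (l : List Int) (hs : l.Pairwise (· ≤ ·)) (i : Int)
    (d : PySem.Dict Int Int) (v : Int) (hv : v ∈ l) :
    (pvBuildMap l i d).getD v 0 = i + (l.countP (fun x => decide (x ≤ v)) : Int) := by
  induction l generalizing i d with
  | nil => cases hv
  | cons x xs ih =>
      rcases List.pairwise_cons.1 hs with ⟨hx, hxs⟩
      simp only [pvBuildMap]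
      by_cases hmem : v ∈ xs
      · rw [ih hxs _ _ hmem]
        have hxle : x ≤ v := hx v hmem
        rw [List.countP_cons_of_pos (by simpa using hxle)]
        push_cast; ring
      · have hvx : v = x := by
          rcases List.mem_cons.1 hv with h | h
          · exact h
          · exact absurd h hmem
        subst hvx
        rw [pvBuildMap_getD_not_mem _ _ _ _ hmem, PySem.Dict.getD_insert]
        have h0 : xs.countP (fun x => decide (x ≤ v)) = 0 := by
          rw [List.countP_eq_zero]
          intro a ha
          have h1 : v ≤ a := hx a ha
          have h2 : ¬ a ≤ v := fun hle => hmem (le_antisymm hle h1 ▸ ha)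
          simpa using h2
        rw [List.countP_cons_of_pos (by simp), h0]
        simp

-- bisect_right on a sorted list = number of entries ≤ v.
theorem pvBisectRight_eq_countP (l : List Int) (hs : l.Pairwise (· ≤ ·)) (v : Int) :
    PySem.List.bisectRight l v = l.countP (fun x => decide (x ≤ v)) := by
  obtain ⟨hr, h1, h2⟩ := PySem.List.bisectRight_spec l v hs
  set r := PySem.List.bisectRight l v with hrdef
  have hsplit : l.countP (fun x => decide (x ≤ v)) = (l.take r).countP (fun x => decide (x ≤ v)) + (l.drop r).countP (fun x => decide (x ≤ v)) := by
    conv_lhs => rw [← List.take_append_drop r l]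
    exact List.countP_append
  have htake : (l.take r).countP (fun x => decide (x ≤ v)) = r := by
    have hall : ∀ a ∈ l.take r, (fun x => decide (x ≤ v)) a = true := by
      intro a ha
      obtain ⟨j, hj, hja⟩ := List.getElem_of_mem ha
      have hjr : j < r := lt_of_lt_of_le hj (by simp)
      have : l[j]'(lt_of_lt_of_le hjr hr) = a := by
        rw [← hja]; exact (List.getElem_take ..).symm
      simpa [← this] using h1 j _ hjr
    rw [List.countP_eq_length.2 hall, List.length_take, min_eq_left hr]
  have hdrop : (l.drop r).countP (fun x => decide (x ≤ v)) = 0 := by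
    rw [List.countP_eq_zero]
    intro a ha
    obtain ⟨j, hj, hja⟩ := List.getElem_of_mem ha
    have hjlen : j < l.length - r := by simpa using hj
    rw [List.getElem_drop] at hja
    have := h2 (r + j) (by omega) (by omega)
    rw [hja] at this
    simp only [decide_eq_true_eq]
    omega
  omega

-- ===== VERDICT (by name: the statement is the Claim_ definition above) =====
theorem renumber_canonical_configuration_spec : Claim_equal_renumber_canonical_configuration := by
  intro configuration _
  unfold Spec_renumber_canonical_configuration
  unfold renumber_canonical_configuration renumber_canonical_configuration_alt
  have hidx : configuration.foldl (fun acc cycle => cycle.foldl (fun acc el => acc ++ [|el|]) acc) []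
      = configuration.flatMap (fun cycle => cycle.map (fun el => |el|)) := by
    calc configuration.foldl (fun acc cycle => cycle.foldl (fun acc el => acc ++ [|el|]) acc) []
        = configuration.foldl (fun acc cycle => acc ++ cycle.map (fun el => |el|)) [] :=
          PySem.List.foldl_congr_mem _ _ _ _
            (fun acc cycle _ => PySem.List.foldl_append_singleton_eq_map ..)
      _ = configuration.flatMap (fun cycle => cycle.map (fun el => |el|)) := by
          simpa using PySem.List.foldl_append_eq_flatMap
            (fun cycle => cycle.map (fun el => |el|)) configuration (acc := [])
  rw [hidx]
  set idx := PySem.List.sorted (configuration.flatMap (fun cycle => cycle.map (fun el => |el|))) (fun x => x) with hidxdef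
  have hpair : idx.Pairwise (· ≤ ·) := by
    simpa using PySem.List.sorted_pairwise (configuration.flatMap (fun cycle => cycle.map (fun el => |el|))) (fun x => x)
  refine Prod.ext ?_ rfl
  show configuration.foldl _ [] = _
  -- one relabelled cycle of A = the mapped cycle of B
  have hcycle : ∀ cycle ∈ configuration,
      cycle.foldl (fun nc el =>
        if el < 0 then nc ++ [-((pvBuildMap idx 0 PySem.Dict.empty).getD (-el) 0)]
        else nc ++ [(pvBuildMap idx 0 PySem.Dict.empty).getD el 0]) []
      = cycle.map (fun el =>
          let r : Int := (PySem.List.bisectRight idx |el| : Nat)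
          if el < 0 then -r else r) := by
    intro cycle hcyc
    have hval : ∀ el ∈ cycle,
        (pvBuildMap idx 0 PySem.Dict.empty).getD |el| 0
          = ((PySem.List.bisectRight idx |el| : Nat) : Int) := by
      intro el hel
      have hm : |el| ∈ idx := by
        have : |el| ∈ configuration.flatMap (fun cycle => cycle.map (fun el => |el|)) :=
          List.mem_flatMap.2 ⟨cycle, hcyc, List.mem_map_of_mem hel⟩
        exact ((PySem.List.sorted_perm (configuration.flatMap (fun cycle => cycle.map (fun el => |el|))) (fun x => x) false).mem_iff).2 this
      rw [pvBuildMap_getD_mem idx hpair 0 _ _ hm, pvBisectRight_eq_countP idx hpair]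
      simp
    calc cycle.foldl (fun nc el =>
          if el < 0 then nc ++ [-((pvBuildMap idx 0 PySem.Dict.empty).getD (-el) 0)]
          else nc ++ [(pvBuildMap idx 0 PySem.Dict.empty).getD el 0]) []
        = cycle.foldl (fun nc el => nc ++ [(fun el =>
            let r : Int := (PySem.List.bisectRight idx |el| : Nat)
            if el < 0 then -r else r) el]) [] := by
          refine PySem.List.foldl_congr_mem _ _ _ _ (fun nc el hel => ?_)
          by_cases hneg : el < 0
          · have habs : -el = |el| := (abs_of_neg hneg).symm
            rw [if_pos hneg, habs, hval el hel]
            simp [hneg]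
          · have habs : el = |el| := (abs_of_nonneg (by omega)).symm
            rw [if_neg hneg]
            conv_lhs => rw [habs]
            rw [hval el hel]
            simp [hneg]
      _ = cycle.map (fun el =>
            let r : Int := (PySem.List.bisectRight idx |el| : Nat)
            if el < 0 then -r else r) := by
          simpa using PySem.List.foldl_append_singleton_eq_map (l := cycle)
            (f := fun el =>
              let r : Int := (PySem.List.bisectRight idx |el| : Nat)
              if el < 0 then -r else r) (acc := [])
  calc configuration.foldl (fun new cycle =>
        new ++ [cycle.foldl (fun nc el =>
          if el < 0 then nc ++ [-((pvBuildMap idx 0 PySem.Dict.empty).getD (-el) 0)]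
          else nc ++ [(pvBuildMap idx 0 PySem.Dict.empty).getD el 0]) []]) []
      = configuration.foldl (fun new cycle => new ++ [cycle.map (fun el =>
          let r : Int := (PySem.List.bisectRight idx |el| : Nat)
          if el < 0 then -r else r)]) [] :=
        PySem.List.foldl_congr_mem _ _ _ _
          (fun new cycle hcyc => by rw [hcycle cycle hcyc])
    _ = configuration.map (fun cycle => cycle.map (fun el =>
          let r : Int := (PySem.List.bisectRight idx |el| : Nat)
          if el < 0 then -r else r)) := by
        simpa using PySem.List.foldl_append_singleton_eq_map (l := configuration)
          (f := fun cycle => cycle.map (fun el =>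
            let r : Int := (PySem.List.bisectRight idx |el| : Nat)
            if el < 0 then -r else r)) (acc := [])
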